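-- pv_equiv track=rewrite | github.com/sfdjsh/Algorithm | 프로그래머스/1/82612. 부족한 금액 계산하기/부족한 금액 계산하기.py | solution
-- ===== SOURCE A (Python) =====
-- def solution(price, money, count):
--     use = 0
--     for i in range(1, count + 1):
--         use += price * i
--
--     if money < use:
--         return use - money
--     else:
--         return 0
-- ===== SOURCE B (Python) =====
-- def solution(price, money, count):
--     total = price * count * (count + 1) // 2
--     return max(total - money, 0)
-- ===== Notes on version B (the rewrite author's own statement) =====
-- stated objective: faster
-- what changed: replaces the O(count) accumulation loop by the closed-form arithmetic-series formula price*count*(count+1)//2 and a max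
-- outside the precondition, e.g. on solution(1, 0, -2): A returns 0, B returns 1
import Mathlib
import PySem

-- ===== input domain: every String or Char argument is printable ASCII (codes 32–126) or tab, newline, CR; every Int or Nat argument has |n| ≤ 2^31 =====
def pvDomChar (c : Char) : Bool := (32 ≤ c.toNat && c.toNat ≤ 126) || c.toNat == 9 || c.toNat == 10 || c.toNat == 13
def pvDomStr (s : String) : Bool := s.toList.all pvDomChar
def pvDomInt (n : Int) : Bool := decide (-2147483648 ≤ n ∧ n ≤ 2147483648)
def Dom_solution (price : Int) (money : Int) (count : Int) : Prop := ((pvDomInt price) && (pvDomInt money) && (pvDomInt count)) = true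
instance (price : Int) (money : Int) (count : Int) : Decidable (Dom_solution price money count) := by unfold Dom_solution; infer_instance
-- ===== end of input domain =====

-- B replaces A's O(count) accumulation loop by the closed-form arithmetic-series formula (faster, asymptotic).

-- ===== PORT A =====
def solution (price : Int) (money : Int) (count : Int) : Int :=
  let use := (PySem.List.pyRange 1 (count + 1) 1).foldl (fun u i => u + price * i) 0
  if money < use then use - money else 0

-- ===== PORT B =====
def solution_alt (price : Int) (money : Int) (count : Int) : Int :=
  let total := PySem.Int.floordiv (price * count * (count + 1)) 2
  max (total - money) 0

-- ===== PRECONDITION & SPEC =====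
-- Pre_ restricts count to the natural domain (a number of rides, count ≥ 0); B's closed form
-- assumes it, while A's empty loop happens to yield use = 0 for any negative count.
def Pre_solution (price : Int) (money : Int) (count : Int) : Prop := 0 ≤ count
instance (price : Int) (money : Int) (count : Int) : Decidable (Pre_solution price money count) := by unfold Pre_solution; infer_instance
def pvWitness_solution : Int × Int × Int := (3, 20, 4)

def Spec_solution (price : Int) (money : Int) (count : Int) (out : Int) : Prop := out = solution_alt price money count
instance (price : Int) (money : Int) (count : Int) (out : Int) : Decidable (Spec_solution price money count out) := by unfold Spec_solution; infer_instance

-- ===== CLAIM (what is proved, stated in full; the proofs are below) =====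
def Claim_equal_solution : Prop := ∀ (price : Int) (money : Int) (count : Int), Dom_solution price money count → Pre_solution price money count → Spec_solution price money count (solution price money count)

-- ===== LEMMAS AND PROOFS =====

-- twice the loop's accumulated sum is price * n * (n+1)
theorem pv_sum_two (price : Int) : ∀ n : Nat,
    2 * (PySem.List.pyRange 1 ((n : Int) + 1) 1).foldl (fun u i => u + price * i) 0
      = price * (n : Int) * ((n : Int) + 1) := by
  intro n
  induction n with
  | zero => simp [PySem.List.pyRange_one_eq_nil]
  | succ k ih =>
    have hsplit : PySem.List.pyRange 1 ((k : Int) + 1 + 1) 1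
        = PySem.List.pyRange 1 ((k : Int) + 1) 1 ++ [(k : Int) + 1] :=
      PySem.List.pyRange_one_succ_right (by omega)
    push_cast
    rw [hsplit, List.foldl_append]
    simp only [List.foldl]
    nlinarith [ih]

theorem solution_spec : Claim_equal_solution := by
  intro price money count _ hc
  unfold Spec_solution solution solution_alt
  obtain ⟨n, rfl⟩ : ∃ n : Nat, count = (n : Int) := ⟨count.toNat, (Int.toNat_of_nonneg hc).symm⟩
  have h2 := pv_sum_two price n
  set S := (PySem.List.pyRange 1 ((n : Int) + 1) 1).foldl (fun u i => u + price * i) 0 with hS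
  have hfd : PySem.Int.floordiv (price * (n : Int) * ((n : Int) + 1)) 2 = S := by
    rw [PySem.Int.floordiv_eq_ediv_of_pos (by norm_num), ← h2]
    exact Int.mul_ediv_cancel_left S (by norm_num)
  simp only [hfd]
  omega
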